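-- pv_equiv track=rewrite | github.com/AndrewMichael2020/tiny-clinical-agent-test | 04_map_uncoded_problems.py | _lookup_descs
-- ===== SOURCE A (Python) =====
-- from typing import Any, Dict, List, Optional, Tuple
--
-- def _lookup_descs(codes: List[str], retrieved_rows: List[Dict[str, Any]]) -> List[str]:
--     """Return descriptions for each code from retrieved context (best-effort)."""
--     code_to_desc: Dict[str, str] = {}
--     for r in retrieved_rows:
--         if r.get("doc_type") == "icd":
--             c = r.get("icd_code", "")
--             d = r.get("icd_desc", "")
--             if c and d:
--                 code_to_desc[c] = d
--     return [code_to_desc.get(c, "") for c in codes]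
-- ===== SOURCE B (Python) =====
-- from typing import Any, Dict, List, Optional, Tuple
--
-- def _lookup_descs(codes: List[str], retrieved_rows: List[Dict[str, Any]]) -> List[str]:
--     """Per-code scan: for each code, take the description of the last matching icd row."""
--     result = []
--     for c in codes:
--         desc = ""
--         for r in retrieved_rows:
--             if (r.get("doc_type") == "icd" and c and r.get("icd_code", "") == c
--                     and r.get("icd_desc", "")):
--                 desc = r.get("icd_desc", "")
--         result.append(desc)
--     return result
-- ===== Notes on version B (the rewrite author's own statement) =====
-- stated objective: alternative
-- what changed: Replaces the prebuilt code->desc dict with a direct per-code scan of the rows that keeps the last matching description (last-write-wins), so no intermediate dict is built.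
import Mathlib
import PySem

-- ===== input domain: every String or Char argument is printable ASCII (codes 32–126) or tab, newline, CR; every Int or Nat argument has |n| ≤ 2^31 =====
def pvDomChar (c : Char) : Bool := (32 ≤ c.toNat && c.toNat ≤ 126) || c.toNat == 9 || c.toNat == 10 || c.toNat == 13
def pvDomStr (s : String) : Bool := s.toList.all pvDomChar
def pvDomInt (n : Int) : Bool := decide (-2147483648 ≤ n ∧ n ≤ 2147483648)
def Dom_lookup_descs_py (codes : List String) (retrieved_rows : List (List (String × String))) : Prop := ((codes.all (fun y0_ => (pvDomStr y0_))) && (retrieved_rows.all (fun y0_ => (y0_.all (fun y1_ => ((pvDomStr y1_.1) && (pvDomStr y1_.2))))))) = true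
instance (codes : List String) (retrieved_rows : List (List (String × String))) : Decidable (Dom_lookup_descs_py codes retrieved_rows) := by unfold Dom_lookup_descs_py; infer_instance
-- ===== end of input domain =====

-- B drops A's prebuilt dict: each code's description is found by a direct last-write-wins scan of the rows (objective: alternative decomposition).

-- row.get(k) : first-match lookup in the association list (exact for Python dict.get)
def pvRowGet? (r : List (String × String)) (k : String) : Option String :=
  (r.find? (fun p => p.1 == k)).map (·.2)

-- row.get(k, "") : first-match lookup with default ""
def pvRowGetD (r : List (String × String)) (k : String) : String :=
  (pvRowGet? r k).getD ""

-- ===== PORT A =====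
def lookup_descs_py (codes : List String) (retrieved_rows : List (List (String × String))) : List String :=
  let code_to_desc : PySem.Dict String String :=
    retrieved_rows.foldl (fun acc r =>
      if pvRowGet? r "doc_type" = some "icd" then
        let c := pvRowGetD r "icd_code"
        let d := pvRowGetD r "icd_desc"
        if c ≠ "" ∧ d ≠ "" then acc.insert c d else acc
      else acc) PySem.Dict.empty
  codes.map (fun c => code_to_desc.getD c "")

-- ===== PORT B =====
def lookup_descs_py_alt (codes : List String) (retrieved_rows : List (List (String × String))) : List String :=
  codes.map (fun c =>
    retrieved_rows.foldl (fun desc r =>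
      if pvRowGet? r "doc_type" = some "icd" ∧ c ≠ "" ∧ pvRowGetD r "icd_code" = c ∧
          pvRowGetD r "icd_desc" ≠ "" then
        pvRowGetD r "icd_desc"
      else desc) "")

-- ===== PRECONDITION & SPEC =====
def Spec_lookup_descs_py (codes : List String) (retrieved_rows : List (List (String × String))) (out : List String) : Prop := out = lookup_descs_py_alt codes retrieved_rows
instance (codes : List String) (retrieved_rows : List (List (String × String))) (out : List String) : Decidable (Spec_lookup_descs_py codes retrieved_rows out) := by unfold Spec_lookup_descs_py; infer_instance

-- ===== CLAIM (what is proved, stated in full; the proofs are below) =====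
def Claim_equal_lookup_descs_py : Prop := ∀ (codes : List String) (retrieved_rows : List (List (String × String))), Dom_lookup_descs_py codes retrieved_rows → Spec_lookup_descs_py codes retrieved_rows (lookup_descs_py codes retrieved_rows)

-- ===== LEMMAS AND PROOFS =====

-- Loop invariant: the lookup of any fixed code c through A's dict-building fold equals
-- B's last-write-wins fold started from the current lookup value.
lemma lookup_fold_eq (c : String) : ∀ (rows : List (List (String × String))) (acc : PySem.Dict String String),
    (rows.foldl (fun acc r =>
      if pvRowGet? r "doc_type" = some "icd" then
        let cc := pvRowGetD r "icd_code"
        let d := pvRowGetD r "icd_desc"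
        if cc ≠ "" ∧ d ≠ "" then acc.insert cc d else acc
      else acc) acc).getD c "" =
    rows.foldl (fun desc r =>
      if pvRowGet? r "doc_type" = some "icd" ∧ c ≠ "" ∧ pvRowGetD r "icd_code" = c ∧
          pvRowGetD r "icd_desc" ≠ "" then
        pvRowGetD r "icd_desc"
      else desc) (acc.getD c "") := by
  intro rows
  induction rows with
  | nil => intro acc; rfl
  | cons r rs ih =>
    intro acc
    simp only [List.foldl_cons]
    rw [ih]
    congr 1
    by_cases hdoc : pvRowGet? r "doc_type" = some "icd"
    · simp only [hdoc, if_true, true_and]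
      by_cases hcd : pvRowGetD r "icd_code" ≠ "" ∧ pvRowGetD r "icd_desc" ≠ ""
      · simp only [if_pos hcd, PySem.Dict.getD_insert]
        by_cases hc : c = pvRowGetD r "icd_code"
        · simp [hc, hcd.1, hcd.2]
        · have hc' : ¬ pvRowGetD r "icd_code" = c := fun h => hc h.symm
          simp [hc, hc']
      · have hnb : ¬ (c ≠ "" ∧ pvRowGetD r "icd_code" = c ∧ pvRowGetD r "icd_desc" ≠ "") := by
          rintro ⟨h2, h3, h4⟩; exact hcd ⟨h3 ▸ h2, h4⟩
        simp only [if_neg hcd, if_neg hnb]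
    · have hnb : ¬ (pvRowGet? r "doc_type" = some "icd" ∧ c ≠ "" ∧ pvRowGetD r "icd_code" = c ∧
          pvRowGetD r "icd_desc" ≠ "") := fun h => hdoc h.1
      rw [if_neg hdoc, if_neg hnb]

-- ===== VERDICT (by name: the statement is the Claim_ definition above) =====
theorem lookup_descs_py_spec : Claim_equal_lookup_descs_py := by
  intro codes rows _
  unfold Spec_lookup_descs_py lookup_descs_py lookup_descs_py_alt
  refine List.map_congr_left (fun c _ => ?_)
  simpa using lookup_fold_eq c rows PySem.Dict.empty
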